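-- pv_equiv track=rewrite | github.com/spapas/aoc15 | day19.py | get_replacements_for_str
-- ===== SOURCE A (Python) =====
-- def find(substring: str, string: str, idx: int=0) -> int:
--     try:
--         return string.index(substring, idx)
--     except ValueError:
--         return -1
--
-- def get_replacements_for_str(replacements, mol):
--     candidates = set([])
--     for r in replacements:
--         f = r[0]
--         t = r[1]
--         i = find(f, mol)
--         while(i>=0):
--             new_i = i+len(f)
--             new_mol = mol[:i] + t + mol[new_i:]
--             candidates.add(new_mol)
--             i = find(f, mol, new_i)
--     return candidates
-- ===== SOURCE B (Python) =====
-- def get_replacements_for_str(replacements, mol):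
--     candidates = set()
--     for f, t in replacements:
--         parts = mol.split(f)
--         for k in range(len(parts) - 1):
--             candidates.add(f.join(parts[:k + 1]) + t + f.join(parts[k + 1:]))
--     return candidates
-- ===== Notes on version B (the rewrite author's own statement) =====
-- stated objective: alternative
-- what changed: Replaces the index-advancing while loop (repeated str.index with a moving start) by one str.split(f) per rule followed by a join-based reconstruction over the segment list; Pre_ excludes rules with an empty 'from' string, on which A loops forever (never returns) while B's split('') raises ValueError.
import Mathlib
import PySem

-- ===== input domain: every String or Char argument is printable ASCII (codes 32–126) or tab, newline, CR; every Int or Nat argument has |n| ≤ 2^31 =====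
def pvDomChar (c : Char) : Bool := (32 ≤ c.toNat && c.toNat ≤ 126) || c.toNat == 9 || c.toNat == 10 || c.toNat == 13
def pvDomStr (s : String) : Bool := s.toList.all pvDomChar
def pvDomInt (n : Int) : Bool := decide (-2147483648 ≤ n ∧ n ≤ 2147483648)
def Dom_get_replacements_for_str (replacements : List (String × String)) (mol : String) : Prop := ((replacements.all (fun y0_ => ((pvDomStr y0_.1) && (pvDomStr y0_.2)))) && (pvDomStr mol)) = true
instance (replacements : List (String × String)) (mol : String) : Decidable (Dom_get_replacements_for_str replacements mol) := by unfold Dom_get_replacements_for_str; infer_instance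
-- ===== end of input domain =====

-- B replaces A's index-advancing while loop by one split per rule plus a join-based
-- reconstruction over the segment list (alternative decomposition, similar cost).

-- ===== PORT A =====
-- Python helper find(substring, string, idx) = string.index(substring, idx) with ValueError -> -1,
-- i.e. exactly str.find(substring, idx) = PySem.Str.findFrom.
def pvFind (substring : String) (string : String) (idx : Int) : Int :=
  PySem.Str.findFrom string substring idx

-- the 'while i >= 0' loop of A; fuel (mol.length+1) is a totality guard only: inside
-- Pre_ (f nonempty) the loop runs at most mol.length+1 times, so the guard never fires.
-- Slices mol[:i], mol[new_i:] with 0 ≤ i are List.take/List.drop (both clamp like Python slices).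
def pvALoop (mol f t : String) : Nat → Int → PySem.Set String → PySem.Set String
  | 0, _, cands => cands
  | fuel + 1, i, cands =>
    if 0 ≤ i then
      let newI : Int := i + PySem.Str.len f
      let newMol : String := String.mk (mol.toList.take i.toNat ++ t.toList ++ mol.toList.drop newI.toNat)
      pvALoop mol f t fuel (pvFind f mol newI) (cands.add newMol)
    else cands

def get_replacements_for_str (replacements : List (String × String)) (mol : String) : List String :=
  replacements.foldl
    (fun cands r =>
      let f := r.1
      let t := r.2
      pvALoop mol f t (mol.toList.length + 1) (pvFind f mol 0) cands)
    (PySem.Set.ofList [])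

-- ===== PORT B =====
def get_replacements_for_str_alt (replacements : List (String × String)) (mol : String) : List String :=
  replacements.foldl
    (fun cands r =>
      let f := r.1.toList
      let t := r.2.toList
      let parts := PySem.Chars.splitOn mol.toList f
      (List.range (parts.length - 1)).foldl
        (fun c k =>
          PySem.Set.add c (String.mk (PySem.Chars.join f (parts.take (k + 1)) ++ t ++ PySem.Chars.join f (parts.drop (k + 1)))))
        cands)
    PySem.Set.empty

-- ===== PRECONDITION & SPEC =====
-- Pre_ excludes rules whose 'from' string is empty: there A's while loop never terminates
-- (find("", mol, i) is always ≥ 0), so A returns on no such input; B raises ValueError there.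
def Pre_get_replacements_for_str (replacements : List (String × String)) (mol : String) : Prop :=
  ∀ r ∈ replacements, r.1 ≠ ""
instance (replacements : List (String × String)) (mol : String) : Decidable (Pre_get_replacements_for_str replacements mol) := by unfold Pre_get_replacements_for_str; infer_instance

def pvWitness_get_replacements_for_str : (List (String × String)) × String :=
  ([("H", "HO"), ("O", "HH")], "HOH")

def Spec_get_replacements_for_str (replacements : List (String × String)) (mol : String) (out : List String) : Prop := out = get_replacements_for_str_alt replacements mol
instance (replacements : List (String × String)) (mol : String) (out : List String) : Decidable (Spec_get_replacements_for_str replacements mol out) := by unfold Spec_get_replacements_for_str; infer_instance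

-- ===== CLAIM (what is proved, stated in full; the proofs are below) =====
def Claim_equal_get_replacements_for_str : Prop := ∀ (replacements : List (String × String)) (mol : String), Dom_get_replacements_for_str replacements mol → Pre_get_replacements_for_str replacements mol → Spec_get_replacements_for_str replacements mol (get_replacements_for_str replacements mol)

-- ===== LEMMAS AND PROOFS =====

theorem pv_go_no_occ (f : List Char) (hf : f ≠ []) :
    ∀ (fuel : Nat) (l cur : List Char) (acc : List (List Char)),
      ¬ f <:+: l →
      PySem.Chars.splitOn.go f fuel l cur acc = ((cur.reverse ++ l) :: acc).reverse := by
  intro fuel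
  induction fuel with
  | zero => intro l cur acc h; rfl
  | succ n ih =>
    intro l cur acc h
    cases l with
    | nil => simp [PySem.Chars.splitOn.go]
    | cons c rest =>
      have hnp : f.isPrefixOf (c :: rest) = false := by
        simp only [Bool.eq_false_iff, ne_eq, List.isPrefixOf_iff_prefix]
        exact fun hp => h hp.isInfix
      rw [PySem.Chars.splitOn.go, hnp]
      simp only [Bool.false_eq_true, if_false]
      rw [ih rest (c :: cur) acc (fun hi => h (hi.trans (List.suffix_cons c rest).isInfix))]
      simp

theorem pv_go_occ (f : List Char) (hf : f ≠ []) :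
    ∀ (p : Nat) (fuel : Nat) (l cur : List Char) (acc : List (List Char)),
      f <+: l.drop p → (∀ i < p, ¬ f <+: l.drop i) → p + 1 ≤ fuel →
      PySem.Chars.splitOn.go f fuel l cur acc =
        PySem.Chars.splitOn.go f (fuel - (p + 1)) (l.drop (p + f.length)) []
          ((cur.reverse ++ l.take p) :: acc) := by
  intro p
  induction p with
  | zero =>
    intro fuel l cur acc h1 h2 hfuel
    obtain ⟨fuel', rfl⟩ : ∃ fuel', fuel = fuel' + 1 := ⟨fuel - 1, by omega⟩
    simp only [List.drop_zero] at h1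
    cases l with
    | nil => exact absurd (List.prefix_nil.mp h1) hf
    | cons c rest =>
      have hpp : f.isPrefixOf (c :: rest) = true := (List.isPrefixOf_iff_prefix).mpr h1
      rw [PySem.Chars.splitOn.go, hpp]
      simp
  | succ p ih =>
    intro fuel l cur acc h1 h2 hfuel
    obtain ⟨fuel', rfl⟩ : ∃ fuel', fuel = fuel' + 1 := ⟨fuel - 1, by omega⟩
    cases l with
    | nil =>
      exfalso; exact hf (List.prefix_nil.mp (by simpa using h1))
    | cons c rest =>
      have hnp : f.isPrefixOf (c :: rest) = false := by
        simp only [Bool.eq_false_iff, ne_eq, List.isPrefixOf_iff_prefix]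
        exact fun hp => h2 0 (by omega) (by simpa using hp)
      rw [PySem.Chars.splitOn.go, hnp]
      simp only [Bool.false_eq_true, if_false]
      rw [ih fuel' rest (c :: cur) acc (by simpa using h1)
          (fun i hi => by simpa using h2 (i + 1) (by omega)) (by omega)]
      have e1 : fuel' + 1 - (p + 1 + 1) = fuel' - (p + 1) := by omega
      have e2 : List.drop (p + 1 + f.length) (c :: rest) = List.drop (p + f.length) rest := by
        rw [show p + 1 + f.length = (p + f.length) + 1 from by omega, List.drop_succ_cons]
      have e3 : cur.reverse ++ List.take (p + 1) (c :: rest) = (c :: cur).reverse ++ List.take p rest := by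
        simp
      rw [e1, e2, e3]

theorem pv_go_acc (f : List Char) :
    ∀ (fuel : Nat) (l cur : List Char) (acc : List (List Char)),
      PySem.Chars.splitOn.go f fuel l cur acc =
        acc.reverse ++ PySem.Chars.splitOn.go f fuel l cur [] := by
  intro fuel
  induction fuel with
  | zero => intro l cur acc; simp [PySem.Chars.splitOn.go]
  | succ n ih =>
    intro l cur acc
    cases l with
    | nil => simp [PySem.Chars.splitOn.go]
    | cons c rest =>
      rw [PySem.Chars.splitOn.go, PySem.Chars.splitOn.go]
      by_cases hp : f.isPrefixOf (c :: rest) = true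
      · rw [hp]
        simp only [if_true]
        rw [ih _ [] (cur.reverse :: acc), ih _ [] [cur.reverse]]
        simp
      · rw [Bool.eq_false_iff.mpr hp]
        simp only [Bool.false_eq_true, if_false]
        rw [ih rest (c :: cur) acc]

theorem pv_go_fuel (f : List Char) (hf : f ≠ []) :
    ∀ (n : Nat) (l cur : List Char) (acc : List (List Char)) (fuel₁ fuel₂ : Nat),
      l.length = n → l.length ≤ fuel₁ → l.length ≤ fuel₂ →
      PySem.Chars.splitOn.go f fuel₁ l cur acc = PySem.Chars.splitOn.go f fuel₂ l cur acc := by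
  intro n
  induction n using Nat.strong_induction_on with
  | _ n ih =>
    intro l cur acc fuel₁ fuel₂ hn h1 h2
    cases l with
    | nil =>
      cases fuel₁ <;> cases fuel₂ <;> simp [PySem.Chars.splitOn.go]
    | cons c rest =>
      subst hn
      obtain ⟨a, rfl⟩ : ∃ a, fuel₁ = a + 1 := ⟨fuel₁ - 1, by simp at h1; omega⟩
      obtain ⟨b, rfl⟩ : ∃ b, fuel₂ = b + 1 := ⟨fuel₂ - 1, by simp at h2; omega⟩
      rw [PySem.Chars.splitOn.go, PySem.Chars.splitOn.go]
      by_cases hp : f.isPrefixOf (c :: rest) = true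
      · rw [hp]
        simp only [if_true]
        have hflen : 1 ≤ f.length := List.length_pos_iff.mpr hf
        have hd : (List.drop f.length (c :: rest)).length = (c :: rest).length - f.length := by
          simp
        exact ih (List.drop f.length (c :: rest)).length
          (by simp at h1 ⊢; omega) _ [] (cur.reverse :: acc) a b rfl
          (by simp at h1 ⊢; omega) (by simp at h2 ⊢; omega)
      · rw [Bool.eq_false_iff.mpr hp]
        simp only [Bool.false_eq_true, if_false]
        exact ih rest.length (by simp) rest (c :: cur) acc a b rfl
          (by simp at h1; omega) (by simp at h2; omega)

theorem pv_splitOn_no_occ (m f : List Char) (hf : f ≠ []) (h : ¬ f <:+: m) :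
    PySem.Chars.splitOn m f = [m] := by
  unfold PySem.Chars.splitOn
  rw [pv_go_no_occ f hf _ m [] [] h]
  simp

theorem pv_splitOn_occ (m f : List Char) (hf : f ≠ []) (h : 0 ≤ PySem.Chars.find m f) :
    PySem.Chars.splitOn m f =
      m.take (PySem.Chars.find m f).toNat ::
        PySem.Chars.splitOn (m.drop ((PySem.Chars.find m f).toNat + f.length)) f := by
  obtain ⟨h1, h2⟩ := PySem.Chars.find_spec h
  set p := (PySem.Chars.find m f).toNat with hp
  have hple : p ≤ m.length := by
    have := PySem.Chars.find_le_length m f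
    omega
  have hlen : p + f.length ≤ m.length := by
    have := h1.length_le
    simp at this
    omega
  have hflen : 1 ≤ f.length := List.length_pos_iff.mpr hf
  unfold PySem.Chars.splitOn
  rw [pv_go_occ f hf p (m.length + 1) m [] [] h1 h2 (by omega)]
  rw [pv_go_acc]
  rw [pv_go_fuel f hf (m.drop (p + f.length)).length _ [] [] (m.length + 1 - (p + 1))
      ((m.drop (p + f.length)).length + 1) rfl (by simp; omega) (by omega)]
  simp

theorem pv_splitOn_ne_nil (m f : List Char) (hf : f ≠ []) :
    PySem.Chars.splitOn m f ≠ [] := by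
  rcases (by omega : 0 ≤ PySem.Chars.find m f ∨ PySem.Chars.find m f < 0) with h | h
  · rw [pv_splitOn_occ m f hf h]; simp
  · have : PySem.Chars.find m f = -1 := by
      have := PySem.Chars.neg_one_le_find m f; omega
    rw [pv_splitOn_no_occ m f hf ((PySem.Chars.find_eq_neg_one_iff m f).mp this)]
    simp

theorem pv_join_splitOn (f : List Char) (hf : f ≠ []) :
    ∀ (n : Nat) (m : List Char), m.length = n →
      PySem.Chars.join f (PySem.Chars.splitOn m f) = m := by
  intro n
  induction n using Nat.strong_induction_on with
  | _ n ih =>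
    intro m hn
    rcases (by omega : 0 ≤ PySem.Chars.find m f ∨ PySem.Chars.find m f < 0) with h | h
    · obtain ⟨h1, h2⟩ := PySem.Chars.find_spec h
      set p := (PySem.Chars.find m f).toNat with hp
      have hflen : 1 ≤ f.length := List.length_pos_iff.mpr hf
      have hlen : p + f.length ≤ m.length := by
        have := h1.length_le; simp at this; omega
      have hmpos : 0 < m.length := by omega
      rw [pv_splitOn_occ m f hf h]
      obtain ⟨q, hq⟩ := pv_splitOn_ne_nil (m.drop (p + f.length)) f hf |>
        fun hne => List.exists_cons_of_ne_nil hne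
      obtain ⟨l', hql⟩ := hq
      rw [hql, PySem.Chars.join_cons_cons, ← hql]
      rw [ih (m.drop (p + f.length)).length (by simp; omega) _ rfl]
      -- m.take p ++ f ++ m.drop (p + f.length) = m
      obtain ⟨r, hr⟩ := h1
      have hdrop : List.drop p m = f ++ r := hr.symm
      have hrr : r = List.drop (p + f.length) m := by
        have := congrArg (List.drop f.length) hdrop
        rw [List.drop_drop] at this
        simpa [Nat.add_comm] using this.symm
      calc m.take p ++ f ++ m.drop (p + f.length)
          = m.take p ++ (f ++ r) := by rw [← hrr]; simp
        _ = m.take p ++ m.drop p := by rw [← hdrop]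
        _ = m := by simp
    · have : PySem.Chars.find m f = -1 := by
        have := PySem.Chars.neg_one_le_find m f; omega
      rw [pv_splitOn_no_occ m f hf ((PySem.Chars.find_eq_neg_one_iff m f).mp this)]
      exact PySem.Chars.join_singleton f m

def pvOccList (f t : List Char) (pre m : List Char) : List (List Char) :=
  if h : 0 ≤ PySem.Chars.find m f ∧ f ≠ [] then
    let p := (PySem.Chars.find m f).toNat
    (pre ++ m.take p ++ t ++ m.drop (p + f.length)) ::
      pvOccList f t (pre ++ m.take p ++ f) (m.drop (p + f.length))
  else []
termination_by m.length
decreasing_by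
  have hflen : 1 ≤ f.length := List.length_pos_iff.mpr h.2
  have hinf : f <:+: m := (PySem.Chars.find_nonneg_iff m f).mp h.1
  have hmne : m ≠ [] := by
    intro hm; subst hm
    exact h.2 (List.eq_nil_of_infix_nil hinf)
  have : 0 < m.length := List.length_pos_iff.mpr hmne
  simp
  omega

theorem pv_occList_eq_parts (f t : List Char) (hf : f ≠ []) :
    ∀ (n : Nat) (m pre : List Char), m.length = n →
      pvOccList f t pre m =
        (List.range ((PySem.Chars.splitOn m f).length - 1)).map
          (fun k => pre ++ PySem.Chars.join f ((PySem.Chars.splitOn m f).take (k + 1)) ++ t ++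
            PySem.Chars.join f ((PySem.Chars.splitOn m f).drop (k + 1))) := by
  intro n
  induction n using Nat.strong_induction_on with
  | _ n ih =>
    intro m pre hn
    rcases (by omega : 0 ≤ PySem.Chars.find m f ∨ PySem.Chars.find m f < 0) with h | h
    · obtain ⟨h1, h2⟩ := PySem.Chars.find_spec h
      set p := (PySem.Chars.find m f).toNat with hp
      have hflen : 1 ≤ f.length := List.length_pos_iff.mpr hf
      have hlen : p + f.length ≤ m.length := by
        have := h1.length_le; simp at this; omega
      set m' := m.drop (p + f.length) with hm'
      have hm'len : m'.length = m.length - (p + f.length) := by simp [hm']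
      have hsplit := pv_splitOn_occ m f hf h
      rw [pvOccList, dif_pos ⟨h, hf⟩]
      change (pre ++ m.take p ++ t ++ m') :: pvOccList f t (pre ++ m.take p ++ f) m' = _
      obtain ⟨b, l', hbl⟩ := List.exists_cons_of_ne_nil (pv_splitOn_ne_nil m' f hf)
      have hIH := ih m'.length (by omega) m' (pre ++ m.take p ++ f) rfl
      rw [hIH, hsplit]
      -- lengths
      have hlen2 : (m.take p :: PySem.Chars.splitOn m' f).length - 1 =
          (PySem.Chars.splitOn m' f).length := by simp
      rw [hlen2]
      obtain ⟨n', hn'⟩ : ∃ n', (PySem.Chars.splitOn m' f).length = n' + 1 :=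
        ⟨(PySem.Chars.splitOn m' f).length - 1, by rw [hbl]; simp⟩
      rw [hn', List.range_succ_eq_map]
      rw [List.map_cons]
      congr 1
      · -- k = 0 term
        simp only [List.take_succ_cons, List.take_zero, List.drop_succ_cons, List.drop_zero]
        rw [PySem.Chars.join_singleton]
        rw [pv_join_splitOn f hf m'.length m' rfl]
      · rw [List.map_map]
        apply List.map_congr_left
        intro k hk
        simp only [Function.comp_apply, Nat.succ_eq_add_one]
        have hkn : k + 1 < (PySem.Chars.splitOn m' f).length := by
          simp at hk; omega
        -- take (k+2) (a :: parts') = a :: take (k+1) parts', nonempty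
        have htk : (PySem.Chars.splitOn m' f).take (k + 1) ≠ [] := by
          rw [hbl]; simp
        obtain ⟨c, l'', hcl⟩ := List.exists_cons_of_ne_nil htk
        rw [List.take_succ_cons, List.drop_succ_cons]
        rw [hcl, PySem.Chars.join_cons_cons, ← hcl]
        simp only [List.append_assoc]
        rfl
    · have hne : PySem.Chars.find m f = -1 := by
        have := PySem.Chars.neg_one_le_find m f; omega
      rw [pvOccList, dif_neg (by omega)]
      rw [pv_splitOn_no_occ m f hf ((PySem.Chars.find_eq_neg_one_iff m f).mp hne)]
      simp

def pvAList (mol f t : String) : Nat → Int → List (List Char)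
  | 0, _ => []
  | fuel + 1, i =>
    if 0 ≤ i then
      (mol.toList.take i.toNat ++ t.toList ++ mol.toList.drop (i + PySem.Str.len f).toNat) ::
        pvAList mol f t fuel (pvFind f mol (i + PySem.Str.len f))
    else []

theorem pvALoop_eq_foldl (mol f t : String) :
    ∀ (fuel : Nat) (i : Int) (cands : PySem.Set String),
      pvALoop mol f t fuel i cands =
        (pvAList mol f t fuel i).foldl (fun c x => PySem.Set.add c (String.mk x)) cands := by
  intro fuel
  induction fuel with
  | zero => intro i cands; rfl
  | succ n ih =>
    intro i cands
    rw [pvALoop, pvAList]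
    by_cases h : 0 ≤ i
    · rw [if_pos h, if_pos h, List.foldl_cons, ih]
    · rw [if_neg h, if_neg h]; rfl

theorem pv_str_len_eq (f : String) : PySem.Str.len f = (f.toList.length : Int) := by
  simp [PySem.Str.len]

theorem pvAList_eq_occList (mol f t : String) (hf : f.toList ≠ []) :
    ∀ (fuel : Nat) (c : Nat), c ≤ mol.toList.length →
      mol.toList.length + 1 - c ≤ fuel →
      pvAList mol f t fuel (PySem.Chars.findFrom mol.toList f.toList (c : Int)) =
        pvOccList f.toList t.toList (mol.toList.take c) (mol.toList.drop c) := by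
  intro fuel
  induction fuel with
  | zero => intro c hc hfuel; omega
  | succ n ih =>
    intro c hc hfuel
    set M := mol.toList with hM
    set F := f.toList with hF
    have hrw := PySem.Chars.findFrom_natCast M F c hc
    rcases (by omega : 0 ≤ PySem.Chars.find (M.drop c) F ∨ PySem.Chars.find (M.drop c) F < 0) with h | h
    · obtain ⟨h1, h2⟩ := PySem.Chars.find_spec h
      set q := (PySem.Chars.find (M.drop c) F).toNat with hq
      have hne : ¬ PySem.Chars.find (M.drop c) F = -1 := by omega
      rw [hrw, if_neg hne]
      have hFlen : 1 ≤ F.length := List.length_pos_iff.mpr hf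
      have hqlen : c + q + F.length ≤ M.length := by
        have := h1.length_le
        simp [List.drop_drop] at this
        omega
      have hcast : (c : Int) + PySem.Chars.find (M.drop c) F = ((c + q : Nat) : Int) := by
        push_cast; omega
      rw [hcast]
      rw [pvAList, if_pos (by positivity)]
      rw [pv_str_len_eq]
      have hcast2 : ((c + q : Nat) : Int) + (F.length : Int) = ((c + q + F.length : Nat) : Int) := by
        push_cast; ring
      rw [hcast2]
      have htoNat1 : ((c + q : Nat) : Int).toNat = c + q := by omega
      have htoNat2 : ((c + q + F.length : Nat) : Int).toNat = c + q + F.length := by omega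
      rw [htoNat1, htoNat2]
      have hfind : pvFind f mol ((c + q + F.length : Nat) : Int) =
          PySem.Chars.findFrom M F ((c + q + F.length : Nat) : Int) := by
        simp only [pvFind, PySem.Str.findFrom_eq]
        rfl
      rw [hfind]
      rw [ih (c + q + F.length) (by omega) (by omega)]
      -- now match against pvOccList unfolded
      conv_rhs => rw [pvOccList]
      rw [dif_pos ⟨h, hf⟩]
      have hqEq : (PySem.Chars.find (M.drop c) F).toNat = q := rfl
      change _ = (M.take c ++ (M.drop c).take q ++ t.toList ++ (M.drop c).drop (q + F.length)) ::
        pvOccList F t.toList (M.take c ++ (M.drop c).take q ++ F) ((M.drop c).drop (q + F.length))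
      congr 1
      · rw [← List.take_add, List.drop_drop]
        congr 2
        omega
      · congr 1
        · -- M.take (c+q+F.length) = M.take c ++ (M.drop c).take q ++ F
          have hFpref : F <+: (M.drop (c + q)) := by
            rwa [← List.drop_drop]
          have : List.take F.length (M.drop (c + q)) = F :=
            (List.prefix_iff_eq_take.mp hFpref).symm
          rw [show c + q + F.length = (c + q) + F.length from rfl, List.take_add, List.take_add, this]
        · rw [List.drop_drop]
          congr 1
          omega
    · have heq : PySem.Chars.find (M.drop c) F = -1 := by
        have := PySem.Chars.neg_one_le_find (M.drop c) F; omega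
      rw [hrw, if_pos heq]
      rw [pvAList, if_neg (by omega)]
      rw [pvOccList, dif_neg (by rw [heq]; omega)]

theorem pv_inner (mol f t : String) (hf : f ≠ "") (cands : PySem.Set String) :
    pvALoop mol f t (mol.toList.length + 1) (pvFind f mol 0) cands =
      (List.range ((PySem.Chars.splitOn mol.toList f.toList).length - 1)).foldl
        (fun c k => PySem.Set.add c (String.mk
          (PySem.Chars.join f.toList ((PySem.Chars.splitOn mol.toList f.toList).take (k + 1)) ++
            t.toList ++
            PySem.Chars.join f.toList ((PySem.Chars.splitOn mol.toList f.toList).drop (k + 1)))))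
        cands := by
  have hfl : f.toList ≠ [] := by
    intro h; apply hf; cases f; simp_all
  rw [pvALoop_eq_foldl]
  have h0 : pvFind f mol 0 = PySem.Chars.findFrom mol.toList f.toList ((0 : Nat) : Int) := by
    simp [pvFind]
  rw [h0, pvAList_eq_occList mol f t hfl (mol.toList.length + 1) 0 (by omega) (by omega)]
  simp only [List.take_zero, List.drop_zero]
  rw [pv_occList_eq_parts f.toList t.toList hfl mol.toList.length mol.toList [] rfl]
  rw [List.foldl_map]
  simp only [List.nil_append]

theorem pv_fold (mol : String) :
    ∀ (l : List (String × String)) (cands : PySem.Set String), (∀ r ∈ l, r.1 ≠ "") →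
      l.foldl (fun cands r =>
        pvALoop mol r.1 r.2 (mol.toList.length + 1) (pvFind r.1 mol 0) cands) cands =
      l.foldl (fun cands r =>
        (List.range ((PySem.Chars.splitOn mol.toList r.1.toList).length - 1)).foldl
          (fun c k => PySem.Set.add c (String.mk
            (PySem.Chars.join r.1.toList ((PySem.Chars.splitOn mol.toList r.1.toList).take (k + 1)) ++
              r.2.toList ++
              PySem.Chars.join r.1.toList ((PySem.Chars.splitOn mol.toList r.1.toList).drop (k + 1)))))
          cands) cands := by
  intro l
  induction l with
  | nil => intro cands _; rfl
  | cons r rest ih =>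
    intro cands hpre
    rw [List.foldl_cons, List.foldl_cons]
    rw [pv_inner mol r.1 r.2 (hpre r (by simp)) cands]
    exact ih _ (fun s hs => hpre s (by simp [hs]))


theorem pv_witness_ok :
    Dom_get_replacements_for_str pvWitness_get_replacements_for_str.1 pvWitness_get_replacements_for_str.2 ∧
    Pre_get_replacements_for_str pvWitness_get_replacements_for_str.1 pvWitness_get_replacements_for_str.2 := by
  decide

-- ===== VERDICT (by name: the statement is the Claim_ definition above) =====
theorem get_replacements_for_str_spec : Claim_equal_get_replacements_for_str := by
  intro replacements mol _ hpre
  unfold Spec_get_replacements_for_str get_replacements_for_str get_replacements_for_str_alt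
  exact pv_fold mol replacements _ hpre
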